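-- pv_equiv track=rewrite | github.com/seadonggyun4/truthound | src/truthound/cli_modules/common/options.py | parse_list_callback
-- ===== SOURCE A (Python) =====
-- def parse_list_callback(
--     values: list[str] | None,
--     separator: str = ",",
-- ) -> list[str] | None:
--     """Parse multiple list options into a single flat list.
--
--     Args:
--         values: List of comma-separated strings
--         separator: Separator character
--
--     Returns:
--         Flattened list of strings
--     """
--     if values is None:
--         return None
--     result = []
--     for value in values:
--         result.extend(item.strip() for item in value.split(separator) if item.strip())
--     return result if result else None
-- ===== SOURCE B (Python) =====
-- def _tokens(s, sep):
--     """Recursive tokenizer: find the first separator, emit the head, recurse on the tail."""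
--     if not sep:
--         raise ValueError("empty separator")
--     idx = s.find(sep)
--     if idx < 0:
--         return [s]
--     return [s[:idx]] + _tokens(s[idx + len(sep):], sep)
--
--
-- def parse_list_callback(
--     values,
--     separator=",",
-- ):
--     if values is None:
--         return None
--     out = []
--     for value in values:
--         for token in _tokens(value, separator):
--             token = token.strip()
--             if token:
--                 out.append(token)
--     return out if out else None
-- ===== Notes on version B (the rewrite author's own statement) =====
-- stated objective: alternative
-- what changed: B replaces the built-in per-element split + generator extend with a hand-written recursive find-based tokenizer and an explicit accumulator loop over its tokens.
import Mathlib
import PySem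

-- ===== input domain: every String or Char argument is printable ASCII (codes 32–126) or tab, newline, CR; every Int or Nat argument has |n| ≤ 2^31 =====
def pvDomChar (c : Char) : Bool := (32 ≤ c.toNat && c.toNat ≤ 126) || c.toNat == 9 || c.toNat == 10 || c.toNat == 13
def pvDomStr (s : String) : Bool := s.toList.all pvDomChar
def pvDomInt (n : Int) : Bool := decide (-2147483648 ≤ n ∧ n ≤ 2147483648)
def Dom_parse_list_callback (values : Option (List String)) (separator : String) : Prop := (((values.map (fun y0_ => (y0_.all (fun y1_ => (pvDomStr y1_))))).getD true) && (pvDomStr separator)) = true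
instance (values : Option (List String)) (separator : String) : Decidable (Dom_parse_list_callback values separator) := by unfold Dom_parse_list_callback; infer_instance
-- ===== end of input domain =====

-- B replaces the built-in per-element split + extend with a hand-written recursive find-based
-- tokenizer and an explicit accumulator loop (alternative decomposition, same asymptotic cost).


-- ===== PORT A =====
def parse_list_callback (values : Option (List String)) (separator : String) : Option (List String) :=
  match values with
  | none => none
  | some vs =>
    -- for value in values: result.extend(item.strip() for item in value.split(separator) if item.strip())
    let result := vs.foldl (fun acc value =>
      acc ++ (((PySem.Str.split? value separator).getD []).filter
        (fun item => !(PySem.Str.strip item == ""))).map PySem.Str.strip) []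
    if result.isEmpty then none else some result

-- ===== PORT B =====
-- _tokens(s, sep): recursive find-based tokenizer; the fuel s.length + 1 only makes the
-- recursion structural (each recursive step consumes at least one character when sep ≠ "",
-- and B's tokenizer raises ValueError before recursing when sep = "", which Pre_ excludes
-- whenever the tokenizer is reached, i.e. whenever the values list is nonempty).
def pvTokensGo (sep : List Char) : Nat → List Char → List (List Char)
  | 0, s => [s]
  | fuel+1, s =>
    let idx := PySem.Chars.find s sep
    if idx < 0 then [s]
    else s.take idx.toNat :: pvTokensGo sep fuel (s.drop (idx.toNat + sep.length))

def pvTokens (sep s : List Char) : List (List Char) := pvTokensGo sep (s.length + 1) s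

def parse_list_callback_alt (values : Option (List String)) (separator : String) : Option (List String) :=
  match values with
  | none => none
  | some vs =>
    let out := vs.foldl (fun acc value =>
      (pvTokens separator.toList value.toList).foldl (fun acc2 t =>
        let token := PySem.Chars.strip t
        if token.isEmpty then acc2 else acc2 ++ [String.ofList token]) acc) []
    if out.isEmpty then none else some out

-- ===== PRECONDITION & SPEC =====
-- Pre_ excludes exactly the inputs on which A raises: an empty separator together with a
-- nonempty values list (there str.split raises ValueError on the first element; B's tokenizer
-- raises ValueError too). When values is None or [] the split never runs and both return None,
-- so those inputs stay inside Pre_.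
def Pre_parse_list_callback (values : Option (List String)) (separator : String) : Prop :=
  separator ≠ "" ∨ values.getD [] = []
instance (values : Option (List String)) (separator : String) : Decidable (Pre_parse_list_callback values separator) := by unfold Pre_parse_list_callback; infer_instance

def pvWitness_parse_list_callback : Option (List String) × String := (some ["a, b", "  c ,", ""], ",")

def Spec_parse_list_callback (values : Option (List String)) (separator : String) (out : Option (List String)) : Prop := out = parse_list_callback_alt values separator
instance (values : Option (List String)) (separator : String) (out : Option (List String)) : Decidable (Spec_parse_list_callback values separator out) := by unfold Spec_parse_list_callback; infer_instance

-- ===== CLAIM (what is proved, stated in full; the proofs are below) =====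
def Claim_equal_parse_list_callback : Prop := ∀ (values : Option (List String)) (separator : String), Dom_parse_list_callback values separator → Pre_parse_list_callback values separator → Spec_parse_list_callback values separator (parse_list_callback values separator)

-- ===== LEMMAS AND PROOFS =====

-- find is 0 when sep is a prefix
theorem pvFind_of_prefix {s sep : List Char} (h : sep <+: s) : PySem.Chars.find s sep = 0 := by
  have h0 : 0 ≤ PySem.Chars.find s sep := by
    rw [PySem.Chars.find_nonneg_iff]; exact h.isInfix
  obtain ⟨hpre, hmin⟩ := PySem.Chars.find_spec h0
  have : (PySem.Chars.find s sep).toNat = 0 := by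
    by_contra hne
    exact hmin 0 (Nat.pos_of_ne_zero hne) (by simpa using h)
  omega

-- find on a cons whose head does not start a separator occurrence
theorem pvFind_cons_of_not_prefix {sep : List Char} {c : Char} {rest : List Char}
    (h : ¬ sep <+: (c :: rest)) :
    PySem.Chars.find (c :: rest) sep =
      if PySem.Chars.find rest sep < 0 then -1 else PySem.Chars.find rest sep + 1 := by
  by_cases hr : PySem.Chars.find rest sep < 0
  · rw [if_pos hr]
    have hr' : PySem.Chars.find rest sep = -1 := by
      have := PySem.Chars.neg_one_le_find rest sep; omega
    rw [PySem.Chars.find_eq_neg_one_iff] at hr' ⊢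
    intro hinf
    rcases List.infix_cons_iff.mp hinf with h1 | h2
    · exact h h1
    · exact hr' h2
  · rw [if_neg hr]
    have h0r : 0 ≤ PySem.Chars.find rest sep := by omega
    obtain ⟨hpre, hmin⟩ := PySem.Chars.find_spec h0r
    set k := (PySem.Chars.find rest sep).toNat with hk
    have hinf : sep <:+: (c :: rest) :=
      List.infix_cons_iff.mpr (Or.inr (hpre.isInfix.trans (List.drop_suffix k rest).isInfix))
    have h0 : 0 ≤ PySem.Chars.find (c :: rest) sep :=
      (PySem.Chars.find_nonneg_iff _ _).mpr hinf
    obtain ⟨hpre2, hmin2⟩ := PySem.Chars.find_spec h0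
    set m := (PySem.Chars.find (c :: rest) sep).toNat with hm
    have hm0 : m ≠ 0 := by
      intro h0'
      exact h (by simpa [h0'] using hpre2)
    have hle : m ≤ k + 1 := by
      by_contra hgt
      exact hmin2 (k + 1) (by omega) (by simpa using hpre)
    have hge : k + 1 ≤ m := by
      by_contra hlt
      apply hmin (m - 1) (by omega)
      have hd : (c :: rest).drop m = rest.drop (m - 1) := by
        conv_lhs => rw [show m = (m - 1) + 1 from by omega]
        simp
      rwa [hd] at hpre2
    omega

-- when find succeeds, the suffix after the match is strictly shorter
theorem pvDrop_lt {s sep : List Char} (hsep : sep ≠ [])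
    (h : 0 ≤ PySem.Chars.find s sep) :
    (s.drop ((PySem.Chars.find s sep).toNat + sep.length)).length < s.length := by
  obtain ⟨hpre, -⟩ := PySem.Chars.find_spec h
  have hlen := hpre.length_le
  have hs : 1 ≤ sep.length := List.length_pos_iff.mpr hsep
  simp [List.length_drop] at *
  omega

theorem pvTokensGo_succ (sep : List Char) (fuel : Nat) (s : List Char) :
    pvTokensGo sep (fuel+1) s =
      if PySem.Chars.find s sep < 0 then [s]
      else s.take (PySem.Chars.find s sep).toNat ::
        pvTokensGo sep fuel (s.drop ((PySem.Chars.find s sep).toNat + sep.length)) := rfl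

-- the fuel is irrelevant once it exceeds the length of the string
theorem pvTokensGo_fuel {sep : List Char} (hsep : sep ≠ []) :
    ∀ (f : Nat) (s : List Char) (g : Nat), s.length < f → s.length < g →
      pvTokensGo sep f s = pvTokensGo sep g s := by
  intro f
  induction f with
  | zero => intro s g hf; omega
  | succ f ih =>
    intro s g hf hg
    cases g with
    | zero => omega
    | succ g =>
      simp only [pvTokensGo]
      by_cases hneg : PySem.Chars.find s sep < 0
      · simp [hneg]
      · have h0 : 0 ≤ PySem.Chars.find s sep := by omega
        have hlt := pvDrop_lt hsep h0
        simp only [hneg, if_false]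
        rw [ih _ g (by omega) (by omega)]

theorem pvTokens_ne_nil (sep s : List Char) : pvTokens sep s ≠ [] := by
  unfold pvTokens
  rw [pvTokensGo_succ]
  by_cases h : PySem.Chars.find s sep < 0 <;> simp [h]

def pvConsHead (p : List Char) : List (List Char) → List (List Char)
  | [] => [p]
  | t :: ts => (p ++ t) :: ts

-- splitOn's worker, characterised by the tokenizer recursion
theorem pvGo_spec {sep : List Char} (hsep : sep ≠ []) :
    ∀ (fuel : Nat) (s cur : List Char) (acc : List (List Char)), s.length < fuel →
      PySem.Chars.splitOn.go sep fuel s cur acc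
        = acc.reverse ++ pvConsHead cur.reverse (pvTokens sep s) := by
  have hs1 : 1 ≤ sep.length := List.length_pos_iff.mpr hsep
  intro fuel
  induction fuel with
  | zero => intro s cur acc h; omega
  | succ fuel ih =>
    intro s cur acc hlen
    cases s with
    | nil =>
      rw [PySem.Chars.splitOn.go]
      · have hfind : PySem.Chars.find [] sep = -1 := by
          rw [PySem.Chars.find_eq_neg_one_iff, List.infix_nil]
          exact hsep
        simp [pvTokens, pvTokensGo, hfind, pvConsHead]
      · omega
    | cons c rest =>
      rw [PySem.Chars.splitOn.go]
      by_cases hp : sep.isPrefixOf (c :: rest)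
      · rw [if_pos hp]
        have hp' : sep <+: (c :: rest) := List.isPrefixOf_iff_prefix.mp hp
        have hdl : ((c :: rest).drop sep.length).length < fuel := by
          simp [List.length_drop] at *
          omega
        rw [ih _ [] (cur.reverse :: acc) hdl]
        have hfind : PySem.Chars.find (c :: rest) sep = 0 := pvFind_of_prefix hp'
        have htok : pvTokens sep (c :: rest)
            = [] :: pvTokens sep ((c :: rest).drop sep.length) := by
          show pvTokensGo sep ((c :: rest).length - 1 + 1 + 1) (c :: rest) = _
          rw [pvTokensGo_succ, hfind]
          norm_num
          exact pvTokensGo_fuel hsep _ _ _ (by simp [List.length_drop]; omega)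
            (by omega)
        rw [htok]
        obtain ⟨t, ts, hts⟩ := List.exists_cons_of_ne_nil
          (pvTokens_ne_nil sep ((c :: rest).drop sep.length))
        simp [hts, pvConsHead]
      · rw [if_neg hp]
        have hp' : ¬ sep <+: (c :: rest) := fun hh => hp (List.isPrefixOf_iff_prefix.mpr hh)
        rw [ih rest (c :: cur) acc (by simp at hlen ⊢; omega)]
        have hfc := pvFind_cons_of_not_prefix hp'
        by_cases hr : PySem.Chars.find rest sep < 0
        · rw [if_pos hr] at hfc
          have htokl : pvTokens sep (c :: rest) = [c :: rest] := by
            simp [pvTokens, pvTokensGo, hfc]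
          have htokr : pvTokens sep rest = [rest] := by
            simp [pvTokens, pvTokensGo, show PySem.Chars.find rest sep = -1 from by
              have := PySem.Chars.neg_one_le_find rest sep; omega]
          rw [htokl, htokr]
          simp [pvConsHead]
        · rw [if_neg hr] at hfc
          have h0r : 0 ≤ PySem.Chars.find rest sep := by omega
          set k := (PySem.Chars.find rest sep).toNat with hk
          obtain ⟨hpre, -⟩ := PySem.Chars.find_spec h0r
          have hkl : k + sep.length ≤ rest.length := by
            have := hpre.length_le
            simp [List.length_drop] at this
            omega
          have htokl : pvTokens sep (c :: rest)
              = (c :: rest.take k) :: pvTokensGo sep (rest.length + 1) (rest.drop (k + sep.length)) := by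
            show pvTokensGo sep ((c :: rest).length - 1 + 1 + 1) (c :: rest) = _
            rw [pvTokensGo_succ, hfc]
            have hninf : ¬ PySem.Chars.find rest sep + 1 < 0 := by omega
            rw [if_neg hninf]
            have htn : (PySem.Chars.find rest sep + 1).toNat = k + 1 := by omega
            rw [htn, List.take_succ_cons,
              show k + 1 + sep.length = (k + sep.length) + 1 from by omega,
              List.drop_succ_cons]
            simp
          have htokr : pvTokens sep rest
              = rest.take k :: pvTokensGo sep rest.length (rest.drop (k + sep.length)) := by
            unfold pvTokens
            rw [pvTokensGo_succ, if_neg hr, ← hk]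
          rw [htokl, htokr,
            pvTokensGo_fuel hsep rest.length (rest.drop (k + sep.length)) (rest.length + 1)
              (by simp only [List.length_drop]; omega) (by simp only [List.length_drop]; omega)]
          simp [pvConsHead]

theorem pvSplitOn_eq_tokens {sep : List Char} (hsep : sep ≠ []) (s : List Char) :
    PySem.Chars.splitOn s sep = pvTokens sep s := by
  unfold PySem.Chars.splitOn
  rw [pvGo_spec hsep _ _ _ _ (by omega)]
  obtain ⟨t, ts, hts⟩ := List.exists_cons_of_ne_nil (pvTokens_ne_nil sep s)
  simp [hts, pvConsHead]

-- B's inner loop is a filter+map appended to the accumulator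
theorem pvInnerFold (ts : List (List Char)) (acc : List String) :
    ts.foldl (fun acc2 t =>
        let token := PySem.Chars.strip t
        if token.isEmpty then acc2 else acc2 ++ [String.ofList token]) acc
      = acc ++ (ts.filter (fun t => !(PySem.Chars.strip t).isEmpty)).map
          (fun t => String.ofList (PySem.Chars.strip t)) := by
  induction ts generalizing acc with
  | nil => simp
  | cons t ts ih =>
    rw [List.foldl_cons,
      show (let token := PySem.Chars.strip t
          if token.isEmpty then acc else acc ++ [String.ofList token])
        = if (PySem.Chars.strip t).isEmpty then acc
          else acc ++ [String.ofList (PySem.Chars.strip t)] from rfl]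
    by_cases h : (PySem.Chars.strip t).isEmpty
    · rw [if_pos h, ih]
      simp [h]
    · rw [if_neg h, ih]
      simp [h]

theorem pvOfList_toList (s : String) : String.ofList s.toList = s := by
  cases s; simp [String.ofList]

theorem pvStripBeq (s : String) :
    (PySem.Str.strip s == "") = (PySem.Chars.strip s.toList).isEmpty := by
  rw [Bool.eq_iff_iff]
  simp [List.isEmpty_iff, ← PySem.Str.toList_strip, String.toList_eq_nil_iff]

-- per-value agreement of the two token pipelines
theorem pvPerValue {separator : String} (hsep : separator ≠ "") (v : String) :
    (((PySem.Str.split? v separator).getD []).filter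
        (fun item => !(PySem.Str.strip item == ""))).map PySem.Str.strip
      = ((pvTokens separator.toList v.toList).filter (fun t => !(PySem.Chars.strip t).isEmpty)).map
          (fun t => String.ofList (PySem.Chars.strip t)) := by
  have hsl : separator.toList ≠ [] := by
    simpa [String.toList_eq_nil_iff] using hsep
  have hmap := PySem.Str.split?_map v separator
  rw [PySem.Chars.split?] at hmap
  simp only [List.isEmpty_iff, hsl, if_false] at hmap
  obtain ⟨w, hw, hwl⟩ : ∃ w, PySem.Str.split? v separator = some w ∧
      w.map String.toList = PySem.Chars.splitOn v.toList separator.toList := by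
    cases h : PySem.Str.split? v separator with
    | none => rw [h] at hmap; simp at hmap
    | some w => rw [h] at hmap; exact ⟨w, rfl, by simpa using hmap⟩
  rw [hw, ← pvSplitOn_eq_tokens hsl v.toList, ← hwl]
  rw [List.filter_map, List.map_map]
  have hfun : (fun item => !(PySem.Str.strip item == ""))
      = ((fun t => !(PySem.Chars.strip t).isEmpty) ∘ String.toList) := by
    funext item
    simp [Function.comp, pvStripBeq]
  rw [hfun]
  apply List.map_congr_left
  intro item _
  simp only [Function.comp]
  rw [← PySem.Str.toList_strip, pvOfList_toList]

-- ===== VERDICT (by name: the statement is the Claim_ definition above) =====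
theorem parse_list_callback_spec : Claim_equal_parse_list_callback := by
  intro values separator hdom hpre
  clear hdom
  unfold Spec_parse_list_callback parse_list_callback parse_list_callback_alt
  cases values with
  | none => rfl
  | some vs =>
    rcases hpre with hs | hnil
    · simp only
      have key : ∀ acc : List String,
          vs.foldl (fun acc value =>
            acc ++ (((PySem.Str.split? value separator).getD []).filter
              (fun item => !(PySem.Str.strip item == ""))).map PySem.Str.strip) acc
          = vs.foldl (fun acc value =>
              (pvTokens separator.toList value.toList).foldl (fun acc2 t =>
                let token := PySem.Chars.strip t
                if token.isEmpty then acc2 else acc2 ++ [String.ofList token]) acc) acc := by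
        induction vs with
        | nil => intro acc; rfl
        | cons v vs ih =>
          intro acc
          simp only [List.foldl_cons]
          rw [pvInnerFold, ih, pvPerValue hs]
      rw [key]
    · simp only [Option.getD] at hnil
      subst hnil
      rfl
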